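-- pv_equiv track=rewrite | github.com/inkeep/australia-engine-cloud | engine_cloud/processors/reducto_helper.py | find_closest_page
-- ===== SOURCE A (Python) =====
-- def find_closest_page(page_mappings: dict, target_page: int) -> int:
--     # Get all page numbers from the dictionary
--     pages = sorted(page_mappings.keys())
--
--     # Find the closest page number that's <= target_page
--     closest = pages[0]  # Initialize with first page
--     for page in pages:
--         if page <= target_page:
--             closest = page
--         else:
--             break
--
--     return closest
-- ===== SOURCE B (Python) =====
-- def find_closest_page(page_mappings: dict, target_page: int) -> int:
--     # One pass: track the largest key <= target_page and the overall smallest key.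
--     best = None
--     smallest = None
--     for page in page_mappings:
--         if smallest is None or page < smallest:
--             smallest = page
--         if page <= target_page and (best is None or page > best):
--             best = page
--     return best if best is not None else smallest
-- ===== Notes on version B (the rewrite author's own statement) =====
-- stated objective: faster
-- what changed: Replaces sorting all keys and scanning the sorted prefix with a single unsorted pass that tracks the largest key <= target_page and the overall smallest key.
-- outside the precondition, e.g. on find_closest_page({}, 3): A raises IndexError, B returns None
import Mathlib
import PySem

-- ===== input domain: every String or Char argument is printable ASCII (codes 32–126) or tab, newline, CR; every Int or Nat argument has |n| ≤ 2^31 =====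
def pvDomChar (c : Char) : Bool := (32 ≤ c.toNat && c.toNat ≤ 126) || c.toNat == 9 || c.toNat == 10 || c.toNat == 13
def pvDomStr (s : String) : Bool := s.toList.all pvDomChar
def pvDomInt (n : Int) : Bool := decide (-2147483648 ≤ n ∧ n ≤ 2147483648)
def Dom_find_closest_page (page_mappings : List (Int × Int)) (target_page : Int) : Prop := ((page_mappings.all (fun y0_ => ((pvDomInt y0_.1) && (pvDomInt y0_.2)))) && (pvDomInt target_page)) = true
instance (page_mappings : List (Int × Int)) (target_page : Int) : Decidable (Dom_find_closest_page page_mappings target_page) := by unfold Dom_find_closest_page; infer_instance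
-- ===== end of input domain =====

-- B replaces A's sort-then-scan by a single pass tracking the largest key ≤ target and the
-- overall smallest key (objective: faster, O(n) instead of O(n log n)).

-- ===== PORT A =====
-- A's 'for page in pages: if page <= target: closest = page else: break'
def pvLoopA (target_page : Int) : List Int → Int → Int
  | [], closest => closest
  | page :: rest, closest =>
    if page ≤ target_page then pvLoopA target_page rest page else closest

def find_closest_page (page_mappings : List (Int × Int)) (target_page : Int) : Int :=
  -- pages = sorted(page_mappings.keys()); dict keys = first-occurrence dedup of the pairs' firsts
  let pages := PySem.List.sorted (PySem.List.dedup (page_mappings.map Prod.fst)) (fun x => x) false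
  -- closest = pages[0]  (IndexError on an empty dict: excluded by Pre_)
  let closest := (PySem.List.pyGet? pages 0).getD 0
  pvLoopA target_page pages closest

-- ===== PORT B =====
-- one loop body: update (best, smallest) with one key
def pvStepB (target_page : Int) (st : Option Int × Option Int) (page : Int) : Option Int × Option Int :=
  let smallest :=
    match st.2 with
    | none => some page
    | some s => if page < s then some page else some s
  let best :=
    if page ≤ target_page then
      match st.1 with
      | none => some page
      | some b => if page > b then some page else some b
    else st.1
  (best, smallest)

def find_closest_page_alt (page_mappings : List (Int × Int)) (target_page : Int) : Int :=
  let st := (PySem.List.dedup (page_mappings.map Prod.fst)).foldl (pvStepB target_page) (none, none)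
  match st.1 with
  | some b => b
  | none => st.2.getD 0   -- 'return smallest'; None only for an empty dict, excluded by Pre_

-- ===== PRECONDITION & SPEC =====
-- Pre_ excludes only the empty dict, on which A raises IndexError at pages[0].
def Pre_find_closest_page (page_mappings : List (Int × Int)) (target_page : Int) : Prop :=
  page_mappings ≠ []
instance (page_mappings : List (Int × Int)) (target_page : Int) : Decidable (Pre_find_closest_page page_mappings target_page) := by unfold Pre_find_closest_page; infer_instance

def pvWitness_find_closest_page : (List (Int × Int)) × Int := ([(2, 10), (5, 20)], 4)

def Spec_find_closest_page (page_mappings : List (Int × Int)) (target_page : Int) (out : Int) : Prop := out = find_closest_page_alt page_mappings target_page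
instance (page_mappings : List (Int × Int)) (target_page : Int) (out : Int) : Decidable (Spec_find_closest_page page_mappings target_page out) := by unfold Spec_find_closest_page; infer_instance

-- ===== CLAIM (what is proved, stated in full; the proofs are below) =====
def Claim_equal_find_closest_page : Prop := ∀ (page_mappings : List (Int × Int)) (target_page : Int), Dom_find_closest_page page_mappings target_page → Pre_find_closest_page page_mappings target_page → Spec_find_closest_page page_mappings target_page (find_closest_page page_mappings target_page)

-- ===== LEMMAS AND PROOFS =====

-- B's pair step splits into two independent folds
def pvStepMin (st : Option Int) (page : Int) : Option Int :=
  match st with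
  | none => some page
  | some s => if page < s then some page else some s

def pvStepMax (target_page : Int) (st : Option Int) (page : Int) : Option Int :=
  if page ≤ target_page then
    match st with
    | none => some page
    | some b => if page > b then some page else some b
  else st

theorem pvFold_pair (t : Int) (l : List Int) (b s : Option Int) :
    l.foldl (pvStepB t) (b, s) = (l.foldl (pvStepMax t) b, l.foldl pvStepMin s) := by
  induction l generalizing b s with
  | nil => rfl
  | cons x xs ih => simp [List.foldl, pvStepB, pvStepMin, pvStepMax, ih]

theorem pvStepMin_eq (st : Option Int) (a : Int) :
    pvStepMin st a = some (match st with | none => a | some s => min s a) := by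
  cases st with
  | none => rfl
  | some s => simp only [pvStepMin]; split_ifs <;> simp <;> omega

theorem pvStepMax_eq (t : Int) (st : Option Int) (a : Int) :
    pvStepMax t st a =
      if a ≤ t then some (match st with | none => a | some b => max b a) else st := by
  cases st with
  | none => simp [pvStepMax]
  | some b => simp only [pvStepMax]; split_ifs <;> simp <;> omega

theorem pvStepMin_rcomm (st : Option Int) (a b : Int) :
    pvStepMin (pvStepMin st a) b = pvStepMin (pvStepMin st b) a := by
  cases st <;> simp [pvStepMin_eq] <;> omega

theorem pvStepMax_rcomm (t : Int) (st : Option Int) (a b : Int) :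
    pvStepMax t (pvStepMax t st a) b = pvStepMax t (pvStepMax t st b) a := by
  cases st <;> by_cases ha : a ≤ t <;> by_cases hb : b ≤ t <;>
    simp [pvStepMax_eq, ha, hb] <;> omega

theorem pvFoldMin_keep (l : List Int) (c : Int) (h : ∀ x ∈ l, c ≤ x) :
    l.foldl pvStepMin (some c) = some c := by
  induction l with
  | nil => rfl
  | cons x xs ih =>
    have hx := h x (by simp)
    have : pvStepMin (some c) x = some c := by
      simp [pvStepMin]; omega
    simp only [List.foldl, this]
    exact ih fun y hy => h y (by simp [hy])

theorem pvFoldMax_none (t : Int) (l : List Int) (b : Option Int) (h : ∀ x ∈ l, t < x) :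
    l.foldl (pvStepMax t) b = b := by
  induction l generalizing b with
  | nil => rfl
  | cons x xs ih =>
    have hx := h x (by simp)
    have : pvStepMax t b x = b := by
      simp [pvStepMax]; omega
    simp only [List.foldl, this]
    exact ih b fun y hy => h y (by simp [hy])

-- on a strictly increasing list, B's max-fold computes exactly A's loop
theorem pvFoldMax_loopA (t : Int) (l : List Int) (c : Int)
    (hs : l.Pairwise (· < ·)) (hc : ∀ x ∈ l, c < x) :
    l.foldl (pvStepMax t) (some c) = some (pvLoopA t l c) := by
  induction l generalizing c with
  | nil => rfl
  | cons p r ih =>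
    have hcp : c < p := hc p (by simp)
    have hpr : ∀ x ∈ r, p < x := (List.pairwise_cons.mp hs).1
    by_cases hpt : p ≤ t
    · have : pvStepMax t (some c) p = some p := by
        simp [pvStepMax, hpt]; omega
      simp only [List.foldl, this, pvLoopA, if_pos hpt]
      exact ih p (List.pairwise_cons.mp hs).2 hpr
    · have hstep : pvStepMax t (some c) p = some c := by
        simp [pvStepMax, hpt]
      have hrest : ∀ x ∈ r, t < x := fun x hx => by
        have := hpr x hx; omega
      simp only [List.foldl, hstep, pvLoopA, if_neg hpt]
      exact pvFoldMax_none t r (some c) hrest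

theorem find_closest_page_spec : Claim_equal_find_closest_page := by
  intro m t _ hpre
  show find_closest_page m t = find_closest_page_alt m t
  have hA : find_closest_page m t =
      pvLoopA t (PySem.List.sorted (PySem.List.dedup (m.map Prod.fst)) (fun x => x) false)
        ((PySem.List.pyGet? (PySem.List.sorted (PySem.List.dedup (m.map Prod.fst)) (fun x => x) false) (0 : Int)).getD 0) := rfl
  have hB : find_closest_page_alt m t =
      (match ((PySem.List.dedup (m.map Prod.fst)).foldl (pvStepB t) (none, none)).1 with
       | some b => b
       | none => (((PySem.List.dedup (m.map Prod.fst)).foldl (pvStepB t) (none, none)).2).getD 0) := rfl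
  rw [hA, hB]
  set ks := PySem.List.dedup (m.map Prod.fst) with hks
  set s := PySem.List.sorted ks (fun x => x) false with hsdef
  have hperm : s.Perm ks := PySem.List.sorted_perm ks (fun x => x) false
  -- B's fold over ks equals the fold over the sorted rearrangement s (each component is
  -- right-commutative, so the fold is permutation-invariant)
  have hmaxfold : ks.foldl (pvStepMax t) none = s.foldl (pvStepMax t) none :=
    @List.Perm.foldl_eq _ _ (pvStepMax t) _ _ ⟨pvStepMax_rcomm t⟩ hperm.symm _
  have hminfold : ks.foldl pvStepMin none = s.foldl pvStepMin none :=
    @List.Perm.foldl_eq _ _ pvStepMin _ _ ⟨pvStepMin_rcomm⟩ hperm.symm _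
  rw [pvFold_pair, hmaxfold, hminfold]
  -- s is strictly increasing and nonempty
  have hsorted : s.Pairwise (· < ·) := by
    rw [hsdef, hks, PySem.List.dedup_eq_ofList]
    exact PySem.List.sorted_ofList_pairwise_lt _
  have hksne : ks ≠ [] := by
    rw [hks]
    cases m with
    | nil => exact absurd rfl hpre
    | cons p r =>
      intro hnil
      have : p.1 ∈ PySem.List.dedup ((p :: r).map Prod.fst) := by
        rw [PySem.List.mem_dedup]; simp
      rw [hnil] at this; exact absurd this (List.not_mem_nil)
  have hsne : s ≠ [] := fun h =>
    hksne (((PySem.List.sorted_eq_nil_iff ks (fun x : Int => x) false).mp (hsdef ▸ h)))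
  obtain ⟨h0, rest, hs⟩ := List.exists_cons_of_ne_nil hsne
  rw [hs]
  have hpw := List.pairwise_cons.mp (hs ▸ hsorted)
  have hget : (PySem.List.pyGet? (h0 :: rest) (0 : Int)).getD 0 = h0 := by
    simp [PySem.List.pyGet?, PySem.List.pyIdx?]
  rw [hget]
  by_cases hh : h0 ≤ t
  · -- A enters the loop; B's best-fold tracks it exactly
    have hmax : (h0 :: rest).foldl (pvStepMax t) none = some (pvLoopA t (h0 :: rest) h0) := by
      have h1 : pvStepMax t none h0 = some h0 := by simp [pvStepMax, hh]
      simp only [List.foldl, h1, pvLoopA, if_pos hh]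
      exact pvFoldMax_loopA t rest h0 hpw.2 hpw.1
    rw [hmax]
  · -- h0 > t: every key exceeds t, A breaks at once, B falls back to the minimum h0
    have hall : ∀ x ∈ h0 :: rest, t < x := by
      intro x hx
      rcases List.mem_cons.mp hx with h | h
      · omega
      · have := hpw.1 x h; omega
    have hmax : (h0 :: rest).foldl (pvStepMax t) none = none :=
      pvFoldMax_none t _ none hall
    have hmin : (h0 :: rest).foldl pvStepMin none = some h0 := by
      have h1 : pvStepMin none h0 = some h0 := rfl
      simp only [List.foldl, h1]
      exact pvFoldMin_keep rest h0 fun x hx => le_of_lt (hpw.1 x hx)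
    rw [hmax, hmin]
    simp [pvLoopA, if_neg hh]
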